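-- pv_equiv track=rewrite | github.com/mayfield/plexcli | plexcli/commands/base.py | flatten_dir
-- ===== SOURCE A (Python) =====
-- def flatten_dir(directory):
--     url = []
--     for x in directory:
--         if x[0].startswith('/'):
--             del url[:]
--             part = x[0][1:]
--         else:
--             part = x[0]
--         url.append(part)
--     return url
-- ===== SOURCE B (Python) =====
-- def flatten_dir(directory):
--     heads = [x[0] for x in directory]
--     for i in range(len(heads) - 1, -1, -1):
--         if heads[i].startswith('/'):
--             return [heads[i][1:]] + heads[i + 1:]
--     return heads
-- ===== Notes on version B (the rewrite author's own statement) =====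
-- stated objective: alternative
-- what changed: Locate the last absolute segment with a single backward scan, then build the result directly from that point, instead of appending segments and clearing the accumulator at each reset.
import Mathlib
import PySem

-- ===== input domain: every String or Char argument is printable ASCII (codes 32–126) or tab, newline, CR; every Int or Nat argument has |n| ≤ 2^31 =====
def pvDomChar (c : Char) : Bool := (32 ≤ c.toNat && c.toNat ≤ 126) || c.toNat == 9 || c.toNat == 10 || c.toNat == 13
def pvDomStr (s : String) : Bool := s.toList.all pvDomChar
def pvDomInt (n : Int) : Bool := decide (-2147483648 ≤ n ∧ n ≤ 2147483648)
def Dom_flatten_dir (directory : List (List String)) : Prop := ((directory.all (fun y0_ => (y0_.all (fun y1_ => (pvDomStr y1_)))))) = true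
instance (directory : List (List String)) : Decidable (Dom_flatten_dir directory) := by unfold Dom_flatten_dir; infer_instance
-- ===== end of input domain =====

-- B replaces A's append-and-clear accumulator by a locate-then-build decomposition
-- (find the last absolute segment, then emit the stripped head plus the untouched tail);
-- same return value on all inputs whose inner lists are nonempty (objective: alternative).

-- ===== PORT A =====
-- append-and-clear loop, transliterated as a foldl over the same url accumulator
def flatten_dir (directory : List (List String)) : List String :=
  directory.foldl (fun url x =>
    let h := (PySem.List.pyGet? x 0).getD ""   -- x[0]; Pre_ guarantees x ≠ [] (else IndexError)
    if PySem.Str.startswith h "/" then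
      [PySem.Str.slice h (some 1) none]        -- del url[:]; url.append(x[0][1:])
    else
      url ++ [h]) []                           -- url.append(x[0])

-- ===== PORT B =====
-- backward scan for the last head starting with '/' (the for i in range(len-1,-1,-1) loop):
-- recursing into the tail first returns the LAST match, as the Python loop does
def fdScan : List String → Option (List String)
  | [] => none
  | h :: t =>
    match fdScan t with
    | some r => some r
    | none =>
      if PySem.Str.startswith h "/" then
        some (PySem.Str.slice h (some 1) none :: t)   -- [heads[i][1:]] + heads[i+1:]
      else none

def flatten_dir_alt (directory : List (List String)) : List String :=
  let heads := directory.map (fun x => (PySem.List.pyGet? x 0).getD "")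
  (fdScan heads).getD heads

-- ===== PRECONDITION & SPEC =====
-- Pre_ excludes inputs containing an empty inner list: there x[0] raises IndexError in A (and in B).
def Pre_flatten_dir (directory : List (List String)) : Prop :=
  ∀ x ∈ directory, x ≠ []
instance (directory : List (List String)) : Decidable (Pre_flatten_dir directory) := by
  unfold Pre_flatten_dir; infer_instance

def pvWitness_flatten_dir : List (List String) := [["/srv", "x"], ["a"], ["/root"], ["b"]]

def Spec_flatten_dir (directory : List (List String)) (out : List String) : Prop := out = flatten_dir_alt directory
instance (directory : List (List String)) (out : List String) : Decidable (Spec_flatten_dir directory out) := by unfold Spec_flatten_dir; infer_instance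

-- ===== CLAIM (what is proved, stated in full; the proofs are below) =====
def Claim_equal_flatten_dir : Prop := ∀ (directory : List (List String)), Dom_flatten_dir directory → Pre_flatten_dir directory → Spec_flatten_dir directory (flatten_dir directory)

-- ===== LEMMAS AND PROOFS =====

-- loop invariant: A's fold over the remaining segments, started with accumulator url,
-- equals B's locate-then-build on the remaining heads, with url surviving only if no reset occurs
theorem flatten_dir_invariant (l : List (List String)) :
    ∀ url : List String,
      l.foldl (fun url x =>
        let h := (PySem.List.pyGet? x 0).getD ""
        if PySem.Str.startswith h "/" then [PySem.Str.slice h (some 1) none]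
        else url ++ [h]) url
      = (match fdScan (l.map (fun x => (PySem.List.pyGet? x 0).getD "")) with
         | some r => r
         | none => url ++ l.map (fun x => (PySem.List.pyGet? x 0).getD "")) := by
  induction l with
  | nil => intro url; simp [fdScan]
  | cons x t ih =>
    intro url
    simp only [List.foldl_cons, List.map_cons, fdScan]
    cases h : fdScan (t.map (fun x => (PySem.List.pyGet? x 0).getD "")) with
    | some r =>
      by_cases hs : PySem.Str.startswith ((PySem.List.pyGet? x 0).getD "") "/" = true
      · rw [if_pos hs, ih, h]
      · rw [if_neg hs, ih, h]
    | none =>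
      by_cases hs : PySem.Str.startswith ((PySem.List.pyGet? x 0).getD "") "/" = true
      · rw [if_pos hs, ih, h, if_pos hs]; simp
      · rw [if_neg hs, ih, h, if_neg hs]; simp

-- ===== VERDICT (by name: the statement is the Claim_ definition above) =====
theorem flatten_dir_spec : Claim_equal_flatten_dir := by
  intro directory _ _
  unfold Spec_flatten_dir flatten_dir flatten_dir_alt
  rw [flatten_dir_invariant]
  cases h : fdScan (directory.map (fun x => (PySem.List.pyGet? x 0).getD "")) <;> simp [h]
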